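-- pv_equiv track=rewrite | github.com/Logic-1729/CS2205-Lexer | verify_dot.py | expand_single_label
-- ===== SOURCE A (Python) =====
-- def expand_single_label(token: str):
--     """展开单个子标签为字符集合"""
--     chars = set()
--     if token.startswith("[") and token.endswith("]"):
--         # 处理字符集
--         content = token[1:-1]
--         i = 0
--         while i < len(content):
--             if i + 2 < len(content) and content[i + 1] == "-":
--                 # 范围，如 a-z
--                 start, end = content[i], content[i + 2]
--                 chars.update(chr(c) for c in range(ord(start), ord(end) + 1))
--                 i += 3
--             else:
--                 chars.add(content[i])
--                 i += 1
--     else: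
--         # 普通字符串，逐字符展开
--         chars.update(token)
--     return chars
-- ===== SOURCE B (Python) =====
-- def expand_single_label(token: str):
--     """Expand a single sub-label into its character set: normalize the class
--     body into (lo, hi) codepoint spans first, then build the set in one
--     comprehension."""
--     if not (token.startswith("[") and token.endswith("]")):
--         return set(token)
--     spans = []
--     rest = list(token[1:-1])
--     rest.reverse()  # pop() from the end == consume the content front-to-back
--     while rest:
--         a = rest.pop()
--         if len(rest) >= 2 and rest[-1] == "-":
--             rest.pop()
--             spans.append((ord(a), ord(rest.pop())))
--         else:
--             spans.append((ord(a), ord(a)))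
--     return {chr(c) for lo, hi in spans for c in range(lo, hi + 1)}
-- ===== Notes on version B (the rewrite author's own statement) =====
-- stated objective: alternative
-- what changed: Replaces A's index-arithmetic while loop that mutates the set in place with a two-phase pipeline: a stack-based tokenizer that normalizes the class body into (lo,hi) codepoint spans (singles become degenerate spans), then one set comprehension over all spans.
import Mathlib
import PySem

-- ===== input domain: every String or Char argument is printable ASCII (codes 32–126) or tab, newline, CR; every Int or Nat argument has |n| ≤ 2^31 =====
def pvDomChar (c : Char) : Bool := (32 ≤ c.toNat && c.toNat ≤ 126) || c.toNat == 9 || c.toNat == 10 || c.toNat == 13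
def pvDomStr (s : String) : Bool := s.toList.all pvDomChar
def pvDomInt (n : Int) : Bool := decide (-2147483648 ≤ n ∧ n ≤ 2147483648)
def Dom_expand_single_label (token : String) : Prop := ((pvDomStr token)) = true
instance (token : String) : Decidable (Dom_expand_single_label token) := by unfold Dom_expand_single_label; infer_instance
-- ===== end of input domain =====

-- B tokenizes the class body into (lo,hi) spans first, then expands all spans in one comprehension; A scans by index and mutates the set as it goes. Return values proved equal (both Pythons only read their argument).

-- chr(c) for a codepoint produced by ord of a char in range (exact there)
def pvChr (c : Int) : String := String.ofList [Char.ofNat c.toNat]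

-- ===== PORT A =====
-- the while loop of A: i advances by 3 on a range, by 1 otherwise
def pvLoopA (cs : List Char) (i : Nat) (chars : PySem.Set String) : PySem.Set String :=
  if i < cs.length then
    if i + 2 < cs.length ∧ cs.getD (i+1) ' ' = '-' then
      pvLoopA cs (i+3)
        (PySem.Set.update chars
          ((PySem.List.pyRange ((cs.getD i ' ').toNat : Int) (((cs.getD (i+2) ' ').toNat : Int) + 1) 1).map pvChr))
    else
      pvLoopA cs (i+1) (PySem.Set.add chars (String.ofList [cs.getD i ' ']))
  else chars
termination_by cs.length - i

def expand_single_label (token : String) : List String :=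
  if PySem.Str.startswith token "[" && PySem.Str.endswith token "]" then
    pvLoopA (PySem.Str.slice token (some 1) (some (-1))).toList 0 PySem.Set.empty
  else
    PySem.Set.update PySem.Set.empty (token.toList.map (fun c => String.ofList [c]))

-- ===== PORT B =====
-- B's while loop pops the content front-to-back (via reverse + pop) and emits
-- (lo,hi) spans; ported as structural recursion consuming the list from the front.
def pvSpans : List Char → List (Int × Int)
  | [] => []
  | a :: '-' :: b :: rest => ((a.toNat : Int), (b.toNat : Int)) :: pvSpans rest
  | a :: rest => ((a.toNat : Int), (a.toNat : Int)) :: pvSpans rest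

def expand_single_label_alt (token : String) : List String :=
  if PySem.Str.startswith token "[" && PySem.Str.endswith token "]" then
    PySem.Set.ofList
      ((pvSpans (PySem.Str.slice token (some 1) (some (-1))).toList).flatMap
        (fun p => (PySem.List.pyRange p.1 (p.2 + 1) 1).map pvChr))
  else
    PySem.Set.ofList (token.toList.map (fun c => String.ofList [c]))

-- ===== PRECONDITION & SPEC =====
def Spec_expand_single_label (token : String) (out : List String) : Prop := out = expand_single_label_alt token
instance (token : String) (out : List String) : Decidable (Spec_expand_single_label token out) := by unfold Spec_expand_single_label; infer_instance

-- ===== CLAIM (what is proved, stated in full; the proofs are below) =====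
def Claim_equal_expand_single_label : Prop := ∀ (token : String), Dom_expand_single_label token → Spec_expand_single_label token (expand_single_label token)

-- ===== LEMMAS AND PROOFS =====

lemma pvSpans_nil : pvSpans [] = [] := rfl

lemma pvSpans_range (a b : Char) (rest : List Char) :
    pvSpans (a :: '-' :: b :: rest) = ((a.toNat : Int), (b.toNat : Int)) :: pvSpans rest := rfl

lemma pvSpans_single (a : Char) (rest : List Char)
    (h : ∀ b c r, rest = b :: c :: r → b ≠ '-') :
    pvSpans (a :: rest) = ((a.toNat : Int), (a.toNat : Int)) :: pvSpans rest := by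
  match rest with
  | [] => simp [pvSpans]
  | [b] => simp [pvSpans]
  | b :: c :: r =>
    have hb : b ≠ '-' := h b c r rfl
    simp [pvSpans, hb]

lemma set_update_append {α : Type} [BEq α] (s : PySem.Set α) (xs ys : List α) :
    PySem.Set.update s (xs ++ ys) = PySem.Set.update (PySem.Set.update s xs) ys := by
  simp [PySem.Set.update, List.foldl_append]

lemma set_update_singleton {α : Type} [BEq α] (s : PySem.Set α) (x : α) :
    PySem.Set.update s [x] = PySem.Set.add s x := rfl

lemma pvLoopA_eq (cs : List Char) (i : Nat) (chars : PySem.Set String) :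
    pvLoopA cs i chars =
      PySem.Set.update chars
        ((pvSpans (cs.drop i)).flatMap (fun p => (PySem.List.pyRange p.1 (p.2 + 1) 1).map pvChr)) := by
  rw [pvLoopA]
  by_cases hlt : i < cs.length
  · have hdrop : cs.drop i = cs[i] :: cs.drop (i+1) := List.drop_eq_getElem_cons hlt
    by_cases hr : i + 2 < cs.length ∧ cs.getD (i+1) ' ' = '-'
    · obtain ⟨h2, hdash⟩ := hr
      have h1 : i + 1 < cs.length := by omega
      have hdash' : cs[i+1] = '-' := by rwa [List.getD_eq_getElem cs ' ' h1] at hdash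
      rw [if_pos hlt, if_pos ⟨h2, hdash⟩, pvLoopA_eq cs (i+3)]
      rw [hdrop, List.drop_eq_getElem_cons h1, List.drop_eq_getElem_cons h2, hdash',
        pvSpans_range, List.flatMap_cons, set_update_append,
        List.getD_eq_getElem cs ' ' hlt, List.getD_eq_getElem cs ' ' h2]
    · rw [if_pos hlt, if_neg hr, pvLoopA_eq cs (i+1)]
      have hcond : ∀ b c r, cs.drop (i+1) = b :: c :: r → b ≠ '-' := by
        intro b c r hbc hb
        subst hb
        apply hr
        have hlen := congrArg List.length hbc
        simp [List.length_drop] at hlen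
        have h1 : i + 1 < cs.length := by omega
        refine ⟨by omega, ?_⟩
        rw [List.getD_eq_getElem cs ' ' h1]
        rw [List.drop_eq_getElem_cons h1] at hbc
        exact (List.cons_eq_cons.mp hbc).1
      rw [hdrop, pvSpans_single _ _ hcond, List.flatMap_cons]
      have hone : (PySem.List.pyRange (((cs[i]'hlt).toNat : Int), ((cs[i]'hlt).toNat : Int)).1
          ((((cs[i]'hlt).toNat : Int), ((cs[i]'hlt).toNat : Int)).2 + 1) 1).map pvChr
          = [String.ofList [cs[i]'hlt]] := by
        rw [PySem.List.pyRange_one_singleton]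
        simp [pvChr]
      rw [hone, set_update_append, set_update_singleton, List.getD_eq_getElem cs ' ' hlt]
  · rw [if_neg hlt]
    have : cs.drop i = [] := List.drop_eq_nil_of_le (by omega)
    simp [this, pvSpans_nil, PySem.Set.update]
termination_by cs.length - i

lemma set_ofList_eq_update_empty {α : Type} [BEq α] (xs : List α) :
    PySem.Set.ofList xs = PySem.Set.update PySem.Set.empty xs := rfl

-- ===== VERDICT (by name: the statement is the Claim_ definition above) =====
theorem expand_single_label_spec : Claim_equal_expand_single_label := by
  intro token _
  unfold Spec_expand_single_label expand_single_label expand_single_label_alt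
  by_cases h : (PySem.Str.startswith token "[" && PySem.Str.endswith token "]") = true
  · rw [if_pos h, if_pos h, pvLoopA_eq, List.drop_zero, set_ofList_eq_update_empty]
  · rw [if_neg h, if_neg h, set_ofList_eq_update_empty]
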